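-- pv_equiv track=rewrite | github.com/Morebenk/zone-pattern-builder | old/clustering_utils.py | is_label_by_case
-- ===== SOURCE A (Python) =====
-- def is_label_by_case(text: str) -> bool:
--     """
--     Determine if text is a label based on case pattern (French ID specific).
--     Labels: lowercase or Title Case (e.g., "nom", "Taille")
--     Values: UPPERCASE (e.g., "PETE", "PARIS")
--
--     NOTE: Only works for French IDs where labels are lowercase/Title case
--     """
--     if not text or not text.isalpha() or len(text) <= 3:
--         return False
--
--     if text.islower():
--         return True
--
--     if text[0].isupper():
--         rest = text[1:]
--         return rest and any(c.islower() for c in rest) and not any(c.isupper() for c in rest)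
--
--     return False
-- ===== SOURCE B (Python) =====
-- def is_label_by_case(text: str) -> bool:
--     if not text or not text.isalpha() or len(text) <= 3:
--         return False
--     upper = sum(1 for c in text if c.isupper())
--     lower = sum(1 for c in text if c.islower())
--     return lower > 0 and (upper == 0 or (upper == 1 and text[0].isupper()))
-- ===== Notes on version B (the rewrite author's own statement) =====
-- stated objective: simpler
-- what changed: Replaces the islower() test plus the two any() scans and early returns with a single counting sweep (upper/lower counts) and one boolean decision.
import Mathlib
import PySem

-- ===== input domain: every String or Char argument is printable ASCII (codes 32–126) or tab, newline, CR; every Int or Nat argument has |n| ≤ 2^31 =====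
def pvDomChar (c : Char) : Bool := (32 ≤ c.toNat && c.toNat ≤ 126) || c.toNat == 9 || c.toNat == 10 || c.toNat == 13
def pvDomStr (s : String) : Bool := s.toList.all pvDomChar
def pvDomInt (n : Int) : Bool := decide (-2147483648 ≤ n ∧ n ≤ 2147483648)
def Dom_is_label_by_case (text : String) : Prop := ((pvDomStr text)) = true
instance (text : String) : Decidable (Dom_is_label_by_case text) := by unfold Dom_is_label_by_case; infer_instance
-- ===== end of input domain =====

-- B replaces A's islower() test plus two any() scans and early returns by one counting
-- sweep (upper/lower counts) and a single boolean decision; objective: simpler.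

-- ===== PORT A =====
-- Python str.islower(): at least one cased char and no uppercase char (hand port, exact on ASCII)
def pyStrIslower (cs : List Char) : Bool :=
  cs.any (fun c => PySem.Chars.islower c || PySem.Chars.isupper c) && !cs.any PySem.Chars.isupper

def is_label_by_case (text : String) : Bool :=
  if text.toList.isEmpty || !PySem.Chars.strIsalpha text.toList || text.toList.length ≤ 3 then false
  else if pyStrIslower text.toList then true
  else if (match PySem.List.pyGet? text.toList 0 with
           | some c => PySem.Chars.isupper c
           | none => false) then
    -- rest = text[1:]
    !(PySem.List.slice text.toList (some 1) none).isEmpty &&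
      (PySem.List.slice text.toList (some 1) none).any PySem.Chars.islower &&
      !(PySem.List.slice text.toList (some 1) none).any PySem.Chars.isupper
  else false

-- ===== PORT B =====
def is_label_by_case_alt (text : String) : Bool :=
  if text.toList.isEmpty || !PySem.Chars.strIsalpha text.toList || text.toList.length ≤ 3 then false
  else
    decide (0 < text.toList.countP (fun c => PySem.Chars.islower c)) &&
      (text.toList.countP (fun c => PySem.Chars.isupper c) == 0 ||
        (text.toList.countP (fun c => PySem.Chars.isupper c) == 1 &&
          (match PySem.List.pyGet? text.toList 0 with
           | some c => PySem.Chars.isupper c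
           | none => false)))

-- ===== PRECONDITION & SPEC =====
def Spec_is_label_by_case (text : String) (out : Bool) : Prop := out = is_label_by_case_alt text
instance (text : String) (out : Bool) : Decidable (Spec_is_label_by_case text out) := by unfold Spec_is_label_by_case; infer_instance

-- ===== CLAIM (what is proved, stated in full; the proofs are below) =====
def Claim_equal_is_label_by_case : Prop := ∀ (text : String), Dom_is_label_by_case text → Spec_is_label_by_case text (is_label_by_case text)

-- ===== LEMMAS AND PROOFS =====

theorem cased_of_isalpha (c : Char) (h : PySem.Chars.isalpha c = true) :
    PySem.Chars.islower c = true ∨ PySem.Chars.isupper c = true := by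
  simp [PySem.Chars.isalpha] at h; tauto

theorem not_both (c : Char) (hl : PySem.Chars.islower c = true)
    (hu : PySem.Chars.isupper c = true) : False := by
  simp [PySem.Chars.islower, PySem.Chars.isupper] at hl hu
  have : ('a' : Char) ≤ 'Z' := le_trans hl.1 hu.2
  exact absurd this (by decide)

theorem lower_of_notupper (c : Char) (ha : PySem.Chars.isalpha c = true)
    (hu : PySem.Chars.isupper c = false) : PySem.Chars.islower c = true := by
  rcases cased_of_isalpha c ha with h | h
  · exact h
  · rw [hu] at h; exact absurd h (by simp)

theorem any_eq_countP {α : Type} (p : α → Bool) (l : List α) :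
    l.any p = decide (0 < l.countP p) := by
  rw [Bool.eq_iff_iff]
  simp [List.any_eq_true, List.countP_pos_iff]

theorem key (c : Char) (rest : List Char)
    (hall : ∀ x ∈ c :: rest, PySem.Chars.isalpha x = true) :
    (if pyStrIslower (c :: rest) then true
     else if PySem.Chars.isupper c then
       !rest.isEmpty && rest.any PySem.Chars.islower && !rest.any PySem.Chars.isupper
     else false)
    = (decide (0 < (c :: rest).countP (fun x => PySem.Chars.islower x)) &&
        ((c :: rest).countP (fun x => PySem.Chars.isupper x) == 0 ||
         ((c :: rest).countP (fun x => PySem.Chars.isupper x) == 1 && PySem.Chars.isupper c))) := by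
  split_ifs with hlow hup
  · -- islower() is true: no uppercase anywhere, head (alpha, not upper) is lower
    simp only [pyStrIslower, Bool.and_eq_true, Bool.not_eq_eq_eq_not, Bool.not_true,
      List.any_eq_false] at hlow
    have hu0 : (c :: rest).countP (fun x => PySem.Chars.isupper x) = 0 :=
      List.countP_eq_zero.mpr (by intro a ha; simp [hlow.2 a ha])
    have hcl : PySem.Chars.islower c = true :=
      lower_of_notupper c (hall c (by simp)) (by simpa using hlow.2 c (by simp))
    have hl0 : 0 < (c :: rest).countP (fun x => PySem.Chars.islower x) :=
      List.countP_pos_iff.mpr ⟨c, by simp, hcl⟩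
    simp [hu0, hl0]
  · -- not islower(), head uppercase
    have hcl : PySem.Chars.islower c = false := by
      by_contra h
      exact not_both c (by simpa using h) hup
    rw [List.countP_cons_of_pos (p := fun x => PySem.Chars.isupper x) (by simpa using hup),
        List.countP_cons_of_neg (p := fun x => PySem.Chars.islower x) (by simp [hcl]),
        any_eq_countP, any_eq_countP, hup]
    cases rest with
    | nil => simp
    | cons b bs =>
      rw [Bool.eq_iff_iff]
      simp only [List.isEmpty_cons, Bool.not_false, Bool.true_and, Bool.and_eq_true,
        Bool.not_eq_true', decide_eq_true_iff, decide_eq_false_iff_not, Bool.or_eq_true,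
        beq_iff_eq, Bool.and_true]
      simp only [show (fun x => PySem.Chars.islower x) = PySem.Chars.islower from rfl,
        show (fun x => PySem.Chars.isupper x) = PySem.Chars.isupper from rfl]
      omega
  · -- not islower(), head not uppercase: head is lower, so some uppercase must be in rest
    have hcl : PySem.Chars.islower c = true :=
      lower_of_notupper c (hall c (by simp)) (by simpa using hup)
    have hru : 0 < rest.countP (fun x => PySem.Chars.isupper x) := by
      have hany : ((c :: rest).any fun x => PySem.Chars.islower x || PySem.Chars.isupper x) = true := by
        simp only [List.any_eq_true]
        exact ⟨c, by simp, by simp [hcl]⟩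
      simp only [pyStrIslower, hany, Bool.true_and, Bool.not_eq_true', Bool.not_eq_false,
        List.any_eq_true] at hlow
      obtain ⟨b, hb, hub⟩ := hlow
      rcases List.mem_cons.mp hb with h | h
      · subst h; exact absurd hub (by simpa using hup)
      · exact List.countP_pos_iff.mpr ⟨b, h, hub⟩
    rw [List.countP_cons_of_neg (p := fun x => PySem.Chars.isupper x) (by simpa using hup)]
    have h1 : (rest.countP (fun x => PySem.Chars.isupper x) == 0) = false := by
      rw [beq_eq_false_iff_ne]; omega
    simp [h1, (by simpa using hup : PySem.Chars.isupper c = false)]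

-- ===== VERDICT (by name: the statement is the Claim_ definition above) =====
theorem is_label_by_case_spec : Claim_equal_is_label_by_case := by
  intro text _
  unfold Spec_is_label_by_case is_label_by_case is_label_by_case_alt
  by_cases hg : (text.toList.isEmpty || !PySem.Chars.strIsalpha text.toList
      || decide (text.toList.length ≤ 3)) = true
  · rw [if_pos hg, if_pos hg]
  · rw [if_neg hg, if_neg hg]
    have hne : text.toList ≠ [] := by
      intro h; apply hg; simp [h]
    have halpha : ∀ x ∈ text.toList, PySem.Chars.isalpha x = true := by
      have hsa : PySem.Chars.strIsalpha text.toList = true := by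
        by_contra h
        exact hg (by simp [Bool.eq_false_iff.mpr h])
      simp [PySem.Chars.strIsalpha, List.all_eq_true] at hsa
      intro x hx; exact hsa.2 x hx
    obtain ⟨c, rest, hcs⟩ := List.exists_cons_of_ne_nil hne
    rw [hcs] at halpha ⊢
    have hget : PySem.List.pyGet? (c :: rest) (0 : Int) = some c := by
      simp [PySem.List.pyGet?, PySem.List.pyIdx?]
    have hslice : PySem.List.slice (c :: rest) (some 1) none = rest := by
      simp [PySem.List.slice]
    rw [hget, hslice]
    exact key c rest halpha
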